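-- pv_equiv track=rewrite | github.com/Vestenar/PythonProjects | 02_Codesignal/02_The Core/092_stringsCrossover.py | stringsCrossover
-- ===== SOURCE A (Python) =====
-- def stringsCrossover(inputArray, result):
--     count = 0
--     for i in range(0,len(inputArray)):
--         for j in range(i+1,len(inputArray)):
--             cross = True
--             for k in range(0,len(result)):
--                 if inputArray[i][k]!=result[k] and inputArray[j][k]!=result[k]:
--                     cross = False
--                     break
--             if cross:
--                 count += 1
--     return count
-- ===== SOURCE B (Python) =====
-- def stringsCrossover(inputArray, result):
--     n = len(result)
--     masks = [sum(1 << k for k in range(n) if s[k] != result[k]) for s in inputArray]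
--     m = len(masks)
--     return sum(1 for i in range(m) for j in range(i + 1, m) if masks[i] & masks[j] == 0)
-- ===== Notes on version B (the rewrite author's own statement) =====
-- stated objective: alternative
-- what changed: B precomputes one mismatch bitmask per string in a single pass and replaces A's per-pair inner position scan by one bitwise AND per pair.
-- outside the precondition, e.g. on stringsCrossover(['b', 'b'], 'ab'): A returns 0, B raises IndexError
import Mathlib
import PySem

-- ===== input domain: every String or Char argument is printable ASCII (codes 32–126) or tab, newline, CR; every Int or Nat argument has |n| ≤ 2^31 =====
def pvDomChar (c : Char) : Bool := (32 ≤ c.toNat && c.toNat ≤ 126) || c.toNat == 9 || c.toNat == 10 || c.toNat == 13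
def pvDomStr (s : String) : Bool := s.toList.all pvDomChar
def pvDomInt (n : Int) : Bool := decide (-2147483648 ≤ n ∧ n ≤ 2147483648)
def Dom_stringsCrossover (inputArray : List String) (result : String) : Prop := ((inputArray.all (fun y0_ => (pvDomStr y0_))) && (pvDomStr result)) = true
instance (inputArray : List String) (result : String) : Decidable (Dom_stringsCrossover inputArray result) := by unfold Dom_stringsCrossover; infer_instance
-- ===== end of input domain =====

-- B replaces A's per-pair inner position scan by a precomputed mismatch bitmask per string
-- and a single bitwise AND per pair (objective: alternative; same O(n^2) pair scan).

-- ===== PORT A =====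
-- inner `for k in range(len(result))` loop with its break: walks the index list, stops at the
-- first k where both strings mismatch result (Pre_ keeps every index in range, so getD is exact)
def pvCrossA (si sj r : List Char) : List Nat → Bool
  | [] => true
  | k :: ks =>
      if si.getD k ' ' ≠ r.getD k ' ' ∧ sj.getD k ' ' ≠ r.getD k ' ' then false
      else pvCrossA si sj r ks

def stringsCrossover (inputArray : List String) (result : String) : Int :=
  let n := inputArray.length
  (List.range n).foldl (fun count i =>
    (List.range' (i + 1) (n - (i + 1))).foldl (fun count j =>
      if pvCrossA (inputArray.getD i "").toList (inputArray.getD j "").toList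
          result.toList (List.range result.toList.length)
      then count + 1 else count) count) 0

-- ===== PORT B =====
-- sum(1 << k for k in range(len(result)) if s[k] != result[k])  (Pre_ keeps s[k] in range)
def pvMask (r s : List Char) : Nat :=
  (List.range r.length).foldl (fun m k => if s.getD k ' ' ≠ r.getD k ' ' then m + 2 ^ k else m) 0

def stringsCrossover_alt (inputArray : List String) (result : String) : Int :=
  let masks := inputArray.map (fun s => pvMask result.toList s.toList)
  let m := masks.length
  (List.range m).foldl (fun c i =>
    (List.range' (i + 1) (m - (i + 1))).foldl (fun c j =>
      if masks.getD i 0 &&& masks.getD j 0 = 0 then c + 1 else c) c) 0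

-- ===== PRECONDITION & SPEC =====
-- Pre_ excludes inputs containing a string shorter than result: there Python A's s[k] raises
-- IndexError except when an accidental earlier break of the inner loop hides it, and B (which
-- precomputes whole masks) raises IndexError on all such inputs.
def Pre_stringsCrossover (inputArray : List String) (result : String) : Prop :=
  ∀ s ∈ inputArray, result.toList.length ≤ s.toList.length
instance (inputArray : List String) (result : String) : Decidable (Pre_stringsCrossover inputArray result) := by unfold Pre_stringsCrossover; infer_instance

def pvWitness_stringsCrossover : List String × String := (["axc", "qbc", "abq"], "abc")

def Spec_stringsCrossover (inputArray : List String) (result : String) (out : Int) : Prop := out = stringsCrossover_alt inputArray result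
instance (inputArray : List String) (result : String) (out : Int) : Decidable (Spec_stringsCrossover inputArray result out) := by unfold Spec_stringsCrossover; infer_instance

-- ===== CLAIM (what is proved, stated in full; the proofs are below) =====
def Claim_equal_stringsCrossover : Prop := ∀ (inputArray : List String) (result : String), Dom_stringsCrossover inputArray result → Pre_stringsCrossover inputArray result → Spec_stringsCrossover inputArray result (stringsCrossover inputArray result)

-- ===== LEMMAS AND PROOFS =====

theorem pvWitness_ok : Dom_stringsCrossover pvWitness_stringsCrossover.1 pvWitness_stringsCrossover.2 ∧
    Pre_stringsCrossover pvWitness_stringsCrossover.1 pvWitness_stringsCrossover.2 := by decide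

-- generic "set bit k when P k" accumulator, the shape of pvMask
def pvBits (P : Nat → Prop) [DecidablePred P] (n : Nat) : Nat :=
  (List.range n).foldl (fun m k => if P k then m + 2 ^ k else m) 0

theorem pvMask_eq_bits (r s : List Char) :
    pvMask r s = pvBits (fun k => s.getD k ' ' ≠ r.getD k ' ') r.length := rfl

theorem pvBits_succ (P : Nat → Prop) [DecidablePred P] (n : Nat) :
    pvBits P (n + 1) = if P n then pvBits P n + 2 ^ n else pvBits P n := by
  simp [pvBits, List.range_succ]

theorem pvBits_lt (P : Nat → Prop) [DecidablePred P] (n : Nat) : pvBits P n < 2 ^ n := by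
  induction n with
  | zero => simp [pvBits]
  | succ n ih =>
      rw [pvBits_succ]
      have h2 : 2 ^ (n + 1) = 2 ^ n + 2 ^ n := by ring
      split_ifs <;> omega

theorem pvBits_testBit (P : Nat → Prop) [DecidablePred P] (n k : Nat) :
    (pvBits P n).testBit k = (decide (k < n) && decide (P k)) := by
  induction n with
  | zero => simp [pvBits]
  | succ n ih =>
      rw [pvBits_succ]
      by_cases hP : P n
      · rw [if_pos hP]
        rcases lt_trichotomy k n with hk | hk | hk
        · rw [Nat.add_comm, Nat.testBit_two_pow_add_gt hk, ih]
          have : k < n + 1 := by omega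
          simp [hk, this]
        · rw [hk, Nat.add_comm, Nat.testBit_two_pow_add_eq]
          have hb : (pvBits P n).testBit n = false :=
            Nat.testBit_lt_two_pow (pvBits_lt P n)
          simp [hb, hP]
        · have hlt : pvBits P n + 2 ^ n < 2 ^ k := by
            have h1 := pvBits_lt P n
            have h2 : 2 ^ (n + 1) ≤ 2 ^ k := Nat.pow_le_pow_right (by norm_num) (by omega)
            have h3 : 2 ^ (n + 1) = 2 ^ n + 2 ^ n := by ring
            omega
          rw [Nat.testBit_lt_two_pow hlt]
          have : ¬ k < n + 1 := by omega
          simp [this]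
      · rw [if_neg hP, ih]
        by_cases hk : k = n
        · subst hk; simp [hP]
        · by_cases hkn : k < n
          · have : k < n + 1 := by omega
            simp [hkn, this]
          · have h1 : ¬ k < n + 1 := by omega
            simp [hkn, h1]

theorem pvLand_zero_iff (a b : Nat) :
    a &&& b = 0 ↔ ∀ k, ¬(a.testBit k = true ∧ b.testBit k = true) := by
  constructor
  · intro h k ⟨ha, hb⟩
    have := Nat.testBit_and a b k
    rw [h, Nat.zero_testBit, ha, hb] at this
    simp at this
  · intro h
    apply Nat.eq_of_testBit_eq
    intro i
    rw [Nat.testBit_and, Nat.zero_testBit]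
    specialize h i
    rcases Bool.eq_false_or_eq_true (a.testBit i) with ha | ha <;>
      rcases Bool.eq_false_or_eq_true (b.testBit i) with hb | hb <;>
        simp [ha, hb] at h ⊢

theorem pvCrossA_iff (si sj r : List Char) (ks : List Nat) :
    pvCrossA si sj r ks = true ↔
      ∀ k ∈ ks, ¬(si.getD k ' ' ≠ r.getD k ' ' ∧ sj.getD k ' ' ≠ r.getD k ' ') := by
  induction ks with
  | nil => simp [pvCrossA]
  | cons k ks ih =>
      simp only [pvCrossA]
      split_ifs with h
      · have hne : ¬ ∀ k' ∈ k :: ks, ¬(si.getD k' ' ' ≠ r.getD k' ' ' ∧ sj.getD k' ' ' ≠ r.getD k' ' ') :=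
          fun hall => hall k (by simp) h
        simp only [Bool.false_eq_true, false_iff]
        exact hne
      · rw [ih]
        constructor
        · intro hall k' hk'
          rcases List.mem_cons.mp hk' with rfl | hk'
          · exact h
          · exact hall _ hk'
        · intro hall k' hk'
          exact hall _ (List.mem_cons_of_mem _ hk')

theorem pvCross_eq_mask (si sj r : List Char) :
    (pvCrossA si sj r (List.range r.length) = true) ↔ (pvMask r si &&& pvMask r sj = 0) := by
  rw [pvCrossA_iff, pvLand_zero_iff]
  constructor
  · intro h k ⟨ha, hb⟩
    rw [pvMask_eq_bits, pvBits_testBit] at ha hb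
    simp only [Bool.and_eq_true, decide_eq_true_eq] at ha hb
    exact h k (List.mem_range.mpr ha.1) ⟨ha.2, hb.2⟩
  · intro h k hk hc
    have hk' := List.mem_range.mp hk
    apply h k
    constructor <;>
      · rw [pvMask_eq_bits, pvBits_testBit]
        simp only [Bool.and_eq_true, decide_eq_true_eq]
        exact ⟨hk', by tauto⟩

theorem pvFoldl_congr {α β : Type} {l : List β} {f g : α → β → α} (a : α)
    (h : ∀ x ∈ l, ∀ a, f a x = g a x) : l.foldl f a = l.foldl g a := by
  induction l generalizing a with
  | nil => rfl
  | cons x l ih => simp only [List.foldl_cons, h x (by simp)]; exact ih _ (fun y hy a => h y (by simp [hy]) a)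

theorem pvGetD_map {α β : Type} (f : α → β) (l : List α) (i : Nat) (d : α) (hd : β)
    (h : i < l.length) : (l.map f).getD i hd = f (l.getD i d) := by
  simp [List.getD, List.getElem?_map, List.getElem?_eq_getElem h]

-- ===== VERDICT (by name: the statement is the Claim_ definition above) =====
theorem stringsCrossover_spec : Claim_equal_stringsCrossover := by
  intro inputArray result _hdom _hpre
  unfold Spec_stringsCrossover stringsCrossover stringsCrossover_alt
  simp only [List.length_map]
  apply pvFoldl_congr
  intro i hi c
  apply pvFoldl_congr
  intro j hj c
  have hi' : i < inputArray.length := List.mem_range.mp hi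
  have hj' : j < inputArray.length := by
    have := List.mem_range'.mp hj
    omega
  rw [pvGetD_map (fun s => pvMask result.toList s.toList) inputArray i "" 0 hi',
      pvGetD_map (fun s => pvMask result.toList s.toList) inputArray j "" 0 hj']
  exact if_congr (pvCross_eq_mask _ _ _) rfl rfl
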